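-- pv_equiv track=rewrite | github.com/EffiSciencesResearch/ML4G-2.0 | meta/tools.py | fmt_diff
-- ===== SOURCE A (Python) =====
-- def fmt(
--     text: str,
--     fg: int | tuple[int, int, int] = None,
--     bg: int | tuple[int, int, int] = None,
--     underline: bool = False,
-- ) -> str:
--     """Format the text with the given colors."""
--
--     mods = ""
--
--     if underline:
--         mods += "\033[4m"
--
--     if fg is not None:
--         if isinstance(fg, int):
--             mods += f"\033[38;5;{fg}m"
--         else:
--             mods += f"\033[38;2;{fg[0]};{fg[1]};{fg[2]}m"
--
--     if bg is not None:
--         if isinstance(bg, int):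
--             mods += f"\033[48;5;{bg}m"
--         else:
--             mods += f"\033[48;2;{bg[0]};{bg[1]};{bg[2]}m"
--
--     if mods:
--         text = mods + text + "\033[0m"
--
--     return text
--
-- def fmt_diff(diff: list[str]) -> tuple[str, str]:
--     """Format the output of difflib.ndiff.
--
--     Returns:
--         tuple[str, str]: The two strings (past, new) with the differences highlighted in ANSI colors.
--     """
--
--     past = ""
--     new = ""
--     for line in diff:
--         mark = line[0]
--         line = line[2:]
--         match mark:
--             case " ":
--                 past += line
--                 new += line
--             case "-":
--                 past += fmt(line, fg=1, underline=True)
--             case "+":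
--                 new += fmt(line, fg=2, underline=True)
--             case "?":
--                 pass
--
--     return past, new
-- ===== SOURCE B (Python) =====
-- def _hl(text: str, color: int) -> str:
--     """Underlined 256-color foreground, as fmt(text, fg=color, underline=True) produces."""
--     return f"\033[4m\033[38;5;{color}m{text}\033[0m"
--
--
-- def fmt_diff(diff: list[str]) -> tuple[str, str]:
--     """Format the output of difflib.ndiff.
--
--     Returns:
--         tuple[str, str]: The two strings (past, new) with the differences highlighted in ANSI colors.
--     """
--     past = "".join(
--         _hl(line[2:], 1) if line[0] == "-" else line[2:]
--         for line in diff
--         if line[0] in " -"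
--     )
--     new = "".join(
--         _hl(line[2:], 2) if line[0] == "+" else line[2:]
--         for line in diff
--         if line[0] in " +"
--     )
--     return past, new
-- ===== Notes on version B (the rewrite author's own statement) =====
-- stated objective: idiomatic
-- what changed: Replaces the single loop threading two string accumulators with two independent filter-and-map join passes (one per side), with the ANSI highlight inlined as a direct f-string helper instead of going through the general fmt() helper.
import Mathlib
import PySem

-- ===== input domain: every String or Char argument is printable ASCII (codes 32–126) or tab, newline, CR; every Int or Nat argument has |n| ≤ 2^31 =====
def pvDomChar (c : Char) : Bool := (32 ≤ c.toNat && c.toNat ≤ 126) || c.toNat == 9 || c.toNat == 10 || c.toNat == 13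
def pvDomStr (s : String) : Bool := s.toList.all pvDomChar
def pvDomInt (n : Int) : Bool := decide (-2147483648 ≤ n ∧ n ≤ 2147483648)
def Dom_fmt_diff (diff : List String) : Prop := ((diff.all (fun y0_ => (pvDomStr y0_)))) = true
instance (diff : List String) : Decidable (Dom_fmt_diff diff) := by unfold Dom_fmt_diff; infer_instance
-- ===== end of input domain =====

-- B changes A's single two-accumulator loop into two independent filter-map join passes
-- (objective: idiomatic); return value only, no mutation involved.

-- ===== PORT A =====
-- A-side helper: literal port of fmt(text, fg, bg, underline); fg/bg are int-or-RGB-triple.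
def pvFmt (text : String) (fg bg : Option (Int ⊕ Int × Int × Int)) (underline : Bool) : String :=
  let mods := if underline then "\x1b[4m" else ""
  let mods := mods ++ (match fg with
    | none => ""
    | some (.inl n) => "\x1b[38;5;" ++ PySem.Int.toStr n ++ "m"
    | some (.inr (r, g, b)) =>
        "\x1b[38;2;" ++ PySem.Int.toStr r ++ ";" ++ PySem.Int.toStr g ++ ";" ++ PySem.Int.toStr b ++ "m")
  let mods := mods ++ (match bg with
    | none => ""
    | some (.inl n) => "\x1b[48;5;" ++ PySem.Int.toStr n ++ "m"
    | some (.inr (r, g, b)) =>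
        "\x1b[48;2;" ++ PySem.Int.toStr r ++ ";" ++ PySem.Int.toStr g ++ ";" ++ PySem.Int.toStr b ++ "m")
  if mods = "" then text else mods ++ text ++ "\x1b[0m"

-- A's loop body: mark = line[0] (none = IndexError, excluded by Pre_), line = line[2:], match mark.
def pvStepA (acc : String × String) (line : String) : String × String :=
  match PySem.Str.pyGet? line 0 with
  | none => acc   -- IndexError in Python; Pre_fmt_diff excludes this
  | some mark =>
      let rest := PySem.Str.slice line (some 2) none
      if mark = ' ' then (acc.1 ++ rest, acc.2 ++ rest)
      else if mark = '-' then (acc.1 ++ pvFmt rest (some (.inl 1)) none true, acc.2)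
      else if mark = '+' then (acc.1, acc.2 ++ pvFmt rest (some (.inl 2)) none true)
      else acc   -- '?' and any other mark: no case matches, pass

def fmt_diff (diff : List String) : String × String :=
  diff.foldl pvStepA ("", "")

-- ===== PORT B =====
-- B-side helper: _hl(text, color) = f"\033[4m\033[38;5;{color}m{text}\033[0m"
def pvHl (text : String) (color : Int) : String :=
  "\x1b[4m\x1b[38;5;" ++ PySem.Int.toStr color ++ "m" ++ text ++ "\x1b[0m"

-- line[0] in " -" ported as the two-character membership test on pyGet? (none = IndexError).
def fmt_diff_alt (diff : List String) : String × String :=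
  let past := PySem.Str.join "" ((diff.filter (fun l =>
      PySem.Str.pyGet? l 0 == some ' ' || PySem.Str.pyGet? l 0 == some '-')).map (fun l =>
      if PySem.Str.pyGet? l 0 == some '-' then pvHl (PySem.Str.slice l (some 2) none) 1
      else PySem.Str.slice l (some 2) none))
  let new := PySem.Str.join "" ((diff.filter (fun l =>
      PySem.Str.pyGet? l 0 == some ' ' || PySem.Str.pyGet? l 0 == some '+')).map (fun l =>
      if PySem.Str.pyGet? l 0 == some '+' then pvHl (PySem.Str.slice l (some 2) none) 2
      else PySem.Str.slice l (some 2) none))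
  (past, new)

-- ===== PRECONDITION & SPEC =====
-- Pre_ excludes lists containing an empty string: there line[0] raises IndexError in A (and in B).
def Pre_fmt_diff (diff : List String) : Prop := ∀ l ∈ diff, l ≠ ""
instance (diff : List String) : Decidable (Pre_fmt_diff diff) := by unfold Pre_fmt_diff; infer_instance
def pvWitness_fmt_diff : List String := ["  keep", "- old", "+ new", "?  ^"]

def Spec_fmt_diff (diff : List String) (out : String × String) : Prop := out = fmt_diff_alt diff
instance (diff : List String) (out : String × String) : Decidable (Spec_fmt_diff diff out) := by unfold Spec_fmt_diff; infer_instance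

-- ===== CLAIM (what is proved, stated in full; the proofs are below) =====
def Claim_equal_fmt_diff : Prop := ∀ (diff : List String), Dom_fmt_diff diff → Pre_fmt_diff diff → Spec_fmt_diff diff (fmt_diff diff)

-- ===== LEMMAS AND PROOFS =====

-- "".join distributes over cons.
theorem pvJoin0_nil : PySem.Str.join "" [] = "" := by
  simp [PySem.Str.join, PySem.Chars.join, List.intercalate]

theorem pvJoin0_cons (x : String) (xs : List String) :
    PySem.Str.join "" (x :: xs) = x ++ PySem.Str.join "" xs := by
  cases xs with
  | nil => simp [PySem.Str.join, PySem.Chars.join, List.intercalate]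
  | cons y ys => simp [PySem.Str.join, PySem.Chars.join, List.intercalate]

-- fmt(rest, fg=c, underline=True) is exactly _hl(rest, c) for a literal color.
theorem pvFmt_eq_hl (rest : String) (c : Int) :
    pvFmt rest (some (.inl c)) none true = pvHl rest c := by
  have h : ("\x1b[4m" : String) ++ "\x1b[38;5;" = "\x1b[4m\x1b[38;5;" := rfl
  simp [pvFmt, pvHl, ← String.append_assoc, h]

-- B's two passes, as functions of the remaining input.
def pvPast (diff : List String) : String :=
  PySem.Str.join "" ((diff.filter (fun l =>
      PySem.Str.pyGet? l 0 == some ' ' || PySem.Str.pyGet? l 0 == some '-')).map (fun l =>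
      if PySem.Str.pyGet? l 0 == some '-' then pvHl (PySem.Str.slice l (some 2) none) 1
      else PySem.Str.slice l (some 2) none))

def pvNew (diff : List String) : String :=
  PySem.Str.join "" ((diff.filter (fun l =>
      PySem.Str.pyGet? l 0 == some ' ' || PySem.Str.pyGet? l 0 == some '+')).map (fun l =>
      if PySem.Str.pyGet? l 0 == some '+' then pvHl (PySem.Str.slice l (some 2) none) 2
      else PySem.Str.slice l (some 2) none))

-- Loop invariant: A's fold from any accumulator appends B's two passes.
theorem pvFold_eq (diff : List String) : ∀ p n : String,
    diff.foldl pvStepA (p, n) = (p ++ pvPast diff, n ++ pvNew diff) := by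
  induction diff with
  | nil => intro p n; simp [pvPast, pvNew, pvJoin0_nil]
  | cons l ls ih =>
    intro p n
    simp only [List.foldl_cons]
    rw [ih (pvStepA (p, n) l).1 (pvStepA (p, n) l).2]
    cases hg : PySem.List.pyGet? l.toList 0 with
    | none =>
      simp [pvStepA, pvPast, pvNew, hg]
    | some mark =>
      by_cases hsp : mark = ' '
      · simp [pvStepA, pvPast, pvNew, hg, hsp, pvJoin0_cons, String.append_assoc]
      · by_cases hm : mark = '-'
        · simp [pvStepA, pvPast, pvNew, hg, hm, pvJoin0_cons, pvFmt_eq_hl, String.append_assoc]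
        · by_cases hp : mark = '+'
          · simp [pvStepA, pvPast, pvNew, hg, hp, pvJoin0_cons, pvFmt_eq_hl,
              String.append_assoc]
          · simp [pvStepA, pvPast, pvNew, hg, hsp, hm, hp]

-- ===== VERDICT (by name: the statement is the Claim_ definition above) =====
theorem fmt_diff_spec : Claim_equal_fmt_diff := by
  intro diff _ _
  unfold Spec_fmt_diff fmt_diff fmt_diff_alt
  rw [pvFold_eq diff "" ""]
  simp [pvPast, pvNew]
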